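-- pv_equiv track=rewrite | github.com/Typonaz/advent_of_code | 2020/day06/main.py | format_answers
-- ===== SOURCE A (Python) =====
-- import copy
--
-- def format_answers(groups_answers):
--     formated_answers = []
--     formated_groups_answer = []
--     for group_answers in groups_answers:
--         if group_answers:
--             formated_groups_answer.append(group_answers)
--         else:
--             formated_answers.append(copy.deepcopy(formated_groups_answer))
--             formated_groups_answer.clear()
--     formated_answers.append(formated_groups_answer)
--     return formated_answers
-- ===== SOURCE B (Python) =====
-- def format_answers(groups_answers):
--     result = []
--     start = 0
--     for i, group_answers in enumerate(groups_answers):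
--         if not group_answers:
--             result.append(groups_answers[start:i])
--             start = i + 1
--     result.append(groups_answers[start:])
--     return result
-- ===== Notes on version B (the rewrite author's own statement) =====
-- stated objective: simpler
-- what changed: Replaces the running accumulator with deepcopy/clear by an index-driven slicing pass: walk enumerate(xs), emit the slice between the previous separator and the current one, then emit the trailing slice.
import Mathlib
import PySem

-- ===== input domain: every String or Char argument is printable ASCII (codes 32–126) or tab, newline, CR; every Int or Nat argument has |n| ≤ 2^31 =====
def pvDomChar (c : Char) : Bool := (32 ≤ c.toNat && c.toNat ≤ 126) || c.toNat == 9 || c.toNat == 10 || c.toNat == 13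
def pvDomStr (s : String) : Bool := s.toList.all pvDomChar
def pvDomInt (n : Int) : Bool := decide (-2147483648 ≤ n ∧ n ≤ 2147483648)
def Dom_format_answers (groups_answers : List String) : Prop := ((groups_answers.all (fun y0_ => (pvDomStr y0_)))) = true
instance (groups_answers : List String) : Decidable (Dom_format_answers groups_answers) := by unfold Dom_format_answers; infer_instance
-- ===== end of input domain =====

-- B replaces A's running accumulator (append / deepcopy / clear) with an index-driven
-- slicing pass over enumerate; simpler, same O(n) cost, identical return value.

-- ===== PORT A =====
-- A's loop state: (formated_answers, formated_groups_answer)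
def pvStepA (st : List (List String) × List String) (g : String) :
    List (List String) × List String :=
  if g ≠ "" then (st.1, st.2 ++ [g]) else (st.1 ++ [st.2], [])

def format_answers (groups_answers : List String) : List (List String) :=
  let st := groups_answers.foldl pvStepA ([], [])
  st.1 ++ [st.2]

-- ===== PORT B =====
-- B's loop state: (result, start); xs is the full input list for slicing
def pvStepB (xs : List String) (st : List (List String) × Int) (p : Int × String) :
    List (List String) × Int :=
  if p.2 = "" then (st.1 ++ [PySem.List.slice xs (some st.2) (some p.1)], p.1 + 1) else st

def format_answers_alt (groups_answers : List String) : List (List String) :=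
  let st := (PySem.List.enumerate groups_answers 0).foldl (pvStepB groups_answers) ([], 0)
  st.1 ++ [PySem.List.slice groups_answers (some st.2) none]

-- ===== PRECONDITION & SPEC =====
def Spec_format_answers (groups_answers : List String) (out : List (List String)) : Prop := out = format_answers_alt groups_answers
instance (groups_answers : List String) (out : List (List String)) : Decidable (Spec_format_answers groups_answers out) := by unfold Spec_format_answers; infer_instance

-- ===== CLAIM (what is proved, stated in full; the proofs are below) =====
def Claim_equal_format_answers : Prop := ∀ (groups_answers : List String), Dom_format_answers groups_answers → Spec_format_answers groups_answers (format_answers groups_answers)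

-- ===== LEMMAS AND PROOFS =====

-- Invariant: after consuming xs[:k], A's current group equals xs[start:k] and B carries start.
lemma pv_loop_eq (xs : List String) :
    ∀ (l : List String) (k start : Nat) (acc : List (List String)),
      start ≤ k → xs.drop k = l →
      (let st := l.foldl pvStepA (acc, (xs.drop start).take (k - start)); st.1 ++ [st.2])
      = (let st := (PySem.List.enumerate l (k : Int)).foldl (pvStepB xs) (acc, (start : Int));
         st.1 ++ [PySem.List.slice xs (some st.2) none]) := by
  intro l
  induction l with
  | nil =>
    intro k start acc hsk hdrop
    simp only [List.foldl_nil, PySem.List.enumerate_nil]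
    have hlen : xs.length ≤ k := by
      by_contra h
      have := List.drop_eq_nil_iff.mp hdrop
      omega
    have h1 : (xs.drop start).take (k - start) = xs.drop start := by
      apply List.take_of_length_le
      simp only [List.length_drop]; omega
    rw [h1, PySem.List.slice_from_natCast]
  | cons x l ih =>
    intro k start acc hsk hdrop
    have hget : xs[k]? = some x := by
      have : (xs.drop k)[0]? = xs[k]? := by
        rw [List.getElem?_drop]; rw [Nat.add_zero]
      rw [hdrop] at this
      simpa using this.symm
    have hlt : k < xs.length := by
      have := List.getElem?_eq_some_iff.mp hget
      exact this.1
    have hdrop' : xs.drop (k + 1) = l := by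
      have : (xs.drop k).tail = xs.drop (k + 1) := by
        rw [List.tail_drop]
      rw [hdrop] at this
      simpa using this.symm
    rw [PySem.List.enumerate_cons, List.foldl_cons, List.foldl_cons]
    by_cases hx : x = ""
    · -- separator: A flushes the current group; B emits the slice xs[start:k]
      simp only [pvStepA, pvStepB, hx, ne_eq, not_true_eq_false, if_false]
      have hslice : PySem.List.slice xs (some (start : Int)) (some (k : Int))
          = (xs.drop start).take (k - start) := PySem.List.slice_natCast xs start k
      have hcast : ((k : Int) + 1) = ((k + 1 : Nat) : Int) := by push_cast; ring
      rw [hslice, hcast]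
      have := ih (k + 1) (k + 1) (acc ++ [(xs.drop start).take (k - start)]) (le_refl _) hdrop'
      simpa using this
    · -- non-separator: A extends the current group; B's state is unchanged
      simp only [pvStepA, pvStepB, hx, ne_eq, not_false_eq_true, if_true]
      have hext : (xs.drop start).take (k - start) ++ [x]
          = (xs.drop start).take (k + 1 - start) := by
        have hidx : (xs.drop start)[k - start]? = some x := by
          rw [List.getElem?_drop]
          have : start + (k - start) = k := by omega
          rw [this, hget]
        have : k + 1 - start = (k - start) + 1 := by omega
        rw [this, List.take_add_one, hidx]
        rfl
      have hcast : ((k : Int) + 1) = ((k + 1 : Nat) : Int) := by push_cast; ring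
      rw [hext, hcast]
      exact ih (k + 1) start acc (by omega) hdrop'

-- ===== VERDICT (by name: the statement is the Claim_ definition above) =====
theorem format_answers_spec : Claim_equal_format_answers := by
  intro xs _
  unfold Spec_format_answers format_answers format_answers_alt
  have := pv_loop_eq xs xs 0 0 [] (le_refl _) rfl
  simpa using this
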